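-- pv_equiv track=rewrite | github.com/black77dragon/DragonShield | DragonShield/python_scripts/instrument_filters.py | filter_instruments
-- ===== SOURCE A (Python) =====
-- from typing import Iterable, Mapping, MutableMapping, Sequence, Any, Dict, Set, List
--
-- def filter_instruments(
--     instruments: Iterable[Mapping[str, Any]],
--     filters: Mapping[str, Set[Any]],
-- ) -> List[Mapping[str, Any]]:
--     """Return instruments matching stacked column filters."""
--     result: List[Mapping[str, Any]] = []
--     for inst in instruments:
--         include = True
--         for column, allowed in filters.items():
--             if allowed and inst.get(column) not in allowed:
--                 include = False
--                 break
--         if include: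
--             result.append(dict(inst))
--     return result
-- ===== SOURCE B (Python) =====
-- from typing import Iterable, Mapping, Any, Set, List
--
-- def filter_instruments(
--     instruments: Iterable[Mapping[str, Any]],
--     filters: Mapping[str, Set[Any]],
-- ) -> List[Mapping[str, Any]]:
--     """Return instruments matching stacked column filters."""
--     working = list(instruments)
--     for column, allowed in filters.items():
--         if allowed:
--             working = [inst for inst in working if inst.get(column) in allowed]
--     return [dict(inst) for inst in working]
-- ===== Notes on version B (the rewrite author's own statement) =====
-- stated objective: alternative
-- what changed: Transposes A's instrument-outer/filter-inner loop with early break into filter-outer successive narrowing filter passes over a working list, copying only the final survivors.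
import Mathlib
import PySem

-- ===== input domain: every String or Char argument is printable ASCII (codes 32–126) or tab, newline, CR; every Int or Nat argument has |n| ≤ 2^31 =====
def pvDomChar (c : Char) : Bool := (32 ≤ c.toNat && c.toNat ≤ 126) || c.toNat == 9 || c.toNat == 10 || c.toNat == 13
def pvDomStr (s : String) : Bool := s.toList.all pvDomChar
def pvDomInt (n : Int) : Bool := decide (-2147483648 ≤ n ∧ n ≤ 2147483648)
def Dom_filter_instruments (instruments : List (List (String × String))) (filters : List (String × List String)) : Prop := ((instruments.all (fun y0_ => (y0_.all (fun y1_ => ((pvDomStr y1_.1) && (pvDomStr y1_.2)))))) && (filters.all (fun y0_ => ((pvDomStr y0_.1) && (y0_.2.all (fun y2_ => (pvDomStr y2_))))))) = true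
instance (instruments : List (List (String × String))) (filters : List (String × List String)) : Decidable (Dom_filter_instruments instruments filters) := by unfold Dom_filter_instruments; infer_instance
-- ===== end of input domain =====

-- B changes A's decomposition: instead of testing each instrument against all filters with
-- an early break, B narrows a working list with one filter pass per truthy filter entry
-- ('alternative'; same asymptotic cost).

-- ===== PORT A =====
-- inst.get(column) in allowed  (None is never in a set of strings)
def pvMatch (inst : List (String × String)) (column : String) (allowed : List String) : Bool :=
  match (PySem.Dict.mk inst).get? column with
  | some v => allowed.contains v
  | none => false

-- the inner 'for column, allowed in filters.items()' loop with its break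
def pvKeepA (inst : List (String × String)) : List (String × List String) → Bool
  | [] => true
  | (column, allowed) :: rest =>
      if !allowed.isEmpty && !pvMatch inst column allowed then false
      else pvKeepA inst rest

def filter_instruments (instruments : List (List (String × String))) (filters : List (String × List String)) : List (List (String × String)) :=
  instruments.foldl (fun result inst => if pvKeepA inst filters then result ++ [inst] else result) []

-- ===== PORT B =====
def filter_instruments_alt (instruments : List (List (String × String))) (filters : List (String × List String)) : List (List (String × String)) :=
  (filters.foldl
    (fun working cf =>
      if !cf.2.isEmpty then working.filter (fun inst => pvMatch inst cf.1 cf.2) else working)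
    instruments).map (fun inst => inst)

-- ===== PRECONDITION & SPEC =====
def Spec_filter_instruments (instruments : List (List (String × String))) (filters : List (String × List String)) (out : List (List (String × String))) : Prop := out = filter_instruments_alt instruments filters
instance (instruments : List (List (String × String))) (filters : List (String × List String)) (out : List (List (String × String))) : Decidable (Spec_filter_instruments instruments filters out) := by unfold Spec_filter_instruments; infer_instance

-- ===== CLAIM (what is proved, stated in full; the proofs are below) =====
def Claim_equal_filter_instruments : Prop := ∀ (instruments : List (List (String × String))) (filters : List (String × List String)), Dom_filter_instruments instruments filters → Spec_filter_instruments instruments filters (filter_instruments instruments filters)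

-- ===== LEMMAS AND PROOFS =====

theorem pvA_foldl_eq_filter (fs : List (String × List String)) :
    ∀ (xs : List (List (String × String))) (acc : List (List (String × String))),
      xs.foldl (fun result inst => if pvKeepA inst fs then result ++ [inst] else result) acc
        = acc ++ xs.filter (fun inst => pvKeepA inst fs) := by
  intro xs
  induction xs with
  | nil => intro acc; simp
  | cons x xs ih =>
      intro acc
      simp only [List.foldl_cons, List.filter_cons]
      by_cases h : pvKeepA x fs
      · simp [h, ih]
      · simp [h, ih]

theorem pvB_foldl_eq_filter :
    ∀ (fs : List (String × List String)) (ws : List (List (String × String))),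
      fs.foldl
          (fun working cf =>
            if !cf.2.isEmpty then working.filter (fun inst => pvMatch inst cf.1 cf.2) else working)
          ws
        = ws.filter (fun inst => pvKeepA inst fs) := by
  intro fs
  induction fs with
  | nil => intro ws; simp [pvKeepA]
  | cons f fs ih =>
      intro ws
      obtain ⟨column, allowed⟩ := f
      by_cases h : allowed.isEmpty
      · simp only [List.foldl_cons, h]
        rw [ih]
        apply List.filter_congr
        intro inst _
        simp [pvKeepA, h]
      · have h' : allowed.isEmpty = false := by simpa using h
        simp only [List.foldl_cons, h', Bool.not_false, if_true]
        rw [ih, List.filter_filter]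
        apply List.filter_congr
        intro inst _
        simp only [pvKeepA, h]
        by_cases hm : pvMatch inst column allowed <;> simp [hm]

-- ===== VERDICT (by name: the statement is the Claim_ definition above) =====
theorem filter_instruments_spec : Claim_equal_filter_instruments := by
  intro instruments filters _
  unfold Spec_filter_instruments filter_instruments filter_instruments_alt
  rw [pvA_foldl_eq_filter, pvB_foldl_eq_filter]
  simp
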